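-- pv_equiv track=rewrite | github.com/hamerfest/Projet_Python | Projet_Python/src/__premiere_partie_A__.py | liste_pref
-- ===== SOURCE A (Python) =====
-- def liste_pref(seq,k):
--     liste=['']
--     liste_pre=[]
--     liste_occ=[]
--     for l in seq:
--         liste_bis=['']
--         for v in liste:
--             if len(v) < k:
--                     liste_bis.append(v+l)
--         liste=liste_bis
--         liste_pre=liste_pre+liste #Stockage de tout les préfixes
--
--     return (liste_pre)
-- ===== SOURCE B (Python) =====
-- def liste_pref(seq, k):
--     res = []
--     for i in range(len(seq)):
--         res.append('')
--         for length in range(1, min(k, i + 1) + 1):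
--             res.append(''.join(seq[i + 1 - length:i + 1]))
--     return res
-- ===== Notes on version B (the rewrite author's own statement) =====
-- stated objective: simpler
-- what changed: Replaces the carried list of growing prefixes (extended char by char and re-filtered each step) with direct slicing: for each position emit '' and the substrings of length 1..min(k,i+1) ending there, so no intermediate list state is maintained.
import Mathlib
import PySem

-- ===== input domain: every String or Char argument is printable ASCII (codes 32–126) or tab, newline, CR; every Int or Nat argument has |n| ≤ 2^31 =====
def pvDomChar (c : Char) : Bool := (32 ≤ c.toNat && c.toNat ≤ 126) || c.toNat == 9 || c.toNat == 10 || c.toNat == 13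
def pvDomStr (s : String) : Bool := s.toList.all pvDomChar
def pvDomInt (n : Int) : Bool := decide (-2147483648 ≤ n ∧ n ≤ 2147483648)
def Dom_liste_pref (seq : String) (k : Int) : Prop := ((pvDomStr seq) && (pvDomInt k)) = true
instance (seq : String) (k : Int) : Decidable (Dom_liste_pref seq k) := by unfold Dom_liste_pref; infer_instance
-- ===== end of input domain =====

-- B replaces A's carried list of growing suffix-strings with direct slicing per position (objective: simpler).

-- ===== PORT A =====
-- Python str values are represented as List Char during the loop, converted to String at the end.
def liste_pref (seq : String) (k : Int) : List String :=
  ((seq.toList.foldl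
      (fun (st : List (List Char) × List (List Char)) (l : Char) =>
        -- liste_bis=['']; for v in liste: if len(v) < k: liste_bis.append(v+l)
        let liste_bis := st.1.foldl (fun lb v => if (v.length : Int) < k then lb ++ [v ++ [l]] else lb) [[]]
        -- liste=liste_bis; liste_pre=liste_pre+liste
        (liste_bis, st.2 ++ liste_bis))
      ([[]], [])).2).map (fun v => String.ofList v)

-- ===== PORT B =====
def liste_pref_alt (seq : String) (k : Int) : List String :=
  let cs := seq.toList
  (List.range cs.length).foldl
    (fun (res : List String) (i : Nat) =>
      res ++ [""] ++ (PySem.List.pyRange 1 (min k ((i : Int) + 1) + 1) 1).map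
        (fun (len : Int) =>
          String.ofList (PySem.List.slice cs (some ((i : Int) + 1 - len)) (some ((i : Int) + 1)))))
    []

-- ===== PRECONDITION & SPEC =====
def Spec_liste_pref (seq : String) (k : Int) (out : List String) : Prop := out = liste_pref_alt seq k
instance (seq : String) (k : Int) (out : List String) : Decidable (Spec_liste_pref seq k out) := by unfold Spec_liste_pref; infer_instance

-- ===== CLAIM (what is proved, stated in full; the proofs are below) =====
def Claim_equal_liste_pref : Prop := ∀ (seq : String) (k : Int), Dom_liste_pref seq k → Spec_liste_pref seq k (liste_pref seq k)

-- ===== LEMMAS AND PROOFS =====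

-- the suffixes of p of lengths 0..min(k,|p|): A's `liste` state after processing p
def pvSfx (k : Int) (p : List Char) : List (List Char) :=
  (List.range ((min k (p.length : Int)).toNat + 1)).map (fun j => p.drop (p.length - j))

theorem pv_inner (k : Int) (l : Char) (liste acc : List (List Char)) :
    liste.foldl (fun lb v => if (v.length : Int) < k then lb ++ [v ++ [l]] else lb) acc
      = acc ++ (liste.filter (fun v => decide ((v.length : Int) < k))).map (fun v => v ++ [l]) := by
  induction liste generalizing acc with
  | nil => simp
  | cons v t ih =>
    by_cases h : (v.length : Int) < k <;>
      simp [List.foldl_cons, h, ih]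

theorem pv_filter_range (k : Int) (m : Nat) :
    (List.range m).filter (fun (j : Nat) => decide ((j : Int) < k)) = List.range (min m k.toNat) := by
  induction m with
  | zero => simp
  | succ m ih =>
    rw [List.range_succ, List.filter_append, ih]
    by_cases h : (m : Int) < k
    · have h1 : min (m + 1) k.toNat = m + 1 := by omega
      have h2 : min m k.toNat = m := by omega
      simp [h, h2, List.range_succ]
    · have h1 : min (m + 1) k.toNat = min m k.toNat := by omega
      simp [h, h1]

theorem pv_sfx_step (k : Int) (p : List Char) (c : Char) :
    [[]] ++ ((pvSfx k p).filter (fun v => decide ((v.length : Int) < k))).map (fun v => v ++ [c])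
      = pvSfx k (p ++ [c]) := by
  unfold pvSfx
  have hm : (min k (p.length : Int)).toNat ≤ p.length := by omega
  rw [List.filter_map]
  have hfilt : (List.range ((min k (p.length : Int)).toNat + 1)).filter
      ((fun v => decide ((v.length : Int) < k)) ∘ (fun j => p.drop (p.length - j)))
      = (List.range ((min k (p.length : Int)).toNat + 1)).filter (fun (j : Nat) => decide ((j : Int) < k)) := by
    apply List.filter_congr
    intro j hj
    have hj' : j < (min k (p.length : Int)).toNat + 1 := List.mem_range.mp hj
    have hlen : (p.drop (p.length - j)).length = j := by
      simp [List.length_drop]; omega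
    simp [Function.comp, hlen]
  rw [hfilt, pv_filter_range]
  have hm2 : min ((min k (p.length : Int)).toNat + 1) k.toNat
      = (min k ((p ++ [c]).length : Int)).toNat := by
    simp only [List.length_append, List.length_cons, List.length_nil]
    omega
  rw [hm2]
  rw [List.range_succ_eq_map]
  simp only [List.map_cons, List.map_map]
  refine List.cons_eq_cons.mpr ⟨?_, ?_⟩
  · have h : (p ++ [c]).length ≤ (p ++ [c]).length - 0 := by omega
    simp
  · apply List.map_congr_left
    intro j hj
    have hj' : j < (min k ((p ++ [c]).length : Int)).toNat := List.mem_range.mp hj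
    have hjle : j ≤ p.length := by
      simp only [List.length_append, List.length_cons, List.length_nil] at hj'
      omega
    simp only [Function.comp]
    have h1 : (p ++ [c]).length - (j + 1) = p.length - j := by simp
    have h3 : p.length - j ≤ p.length := by omega
    rw [h1, List.drop_append_of_le_length h3]

theorem pv_A_fold (k : Int) (ext : List Char) : ∀ (p : List Char) (pre : List (List Char)),
    (ext.foldl
      (fun (st : List (List Char) × List (List Char)) (l : Char) =>
        let liste_bis := st.1.foldl (fun lb v => if (v.length : Int) < k then lb ++ [v ++ [l]] else lb) [[]]
        (liste_bis, st.2 ++ liste_bis))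
      (pvSfx k p, pre)).2
      = pre ++ (List.range ext.length).flatMap (fun (i : Nat) => pvSfx k (p ++ ext.take (i + 1))) := by
  induction ext with
  | nil => intro p pre; simp
  | cons c t ih =>
    intro p pre
    simp only [List.foldl_cons]
    have hstep : (pvSfx k p).foldl (fun lb v => if (v.length : Int) < k then lb ++ [v ++ [c]] else lb) [[]]
        = pvSfx k (p ++ [c]) := by
      rw [pv_inner, ← pv_sfx_step k p c]
    simp only [hstep]
    rw [ih (p ++ [c]) (pre ++ pvSfx k (p ++ [c]))]
    rw [List.length_cons, List.range_succ_eq_map]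
    simp only [List.flatMap_cons, List.flatMap_map, List.take_succ_cons, List.take_zero]
    simp [List.append_assoc]

theorem pv_A_char (seq : String) (k : Int) :
    liste_pref seq k
      = ((List.range seq.toList.length).flatMap (fun (i : Nat) => pvSfx k (seq.toList.take (i + 1)))).map
          (fun v => String.ofList v) := by
  unfold liste_pref
  have h0 : pvSfx k ([] : List Char) = [[]] := by
    unfold pvSfx
    have h : (min k ((([] : List Char).length : Int))).toNat = 0 := by simp
    rw [h]
    simp
  rw [show (([[]], []) : List (List Char) × List (List Char)) = (pvSfx k [], []) by rw [h0]]
  rw [pv_A_fold]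
  simp

theorem pv_block_B (k : Int) (cs : List Char) (i : Nat) (hi : i < cs.length) :
    [""] ++ (PySem.List.pyRange 1 (min k ((i : Int) + 1) + 1) 1).map
        (fun (len : Int) =>
          String.ofList (PySem.List.slice cs (some ((i : Int) + 1 - len)) (some ((i : Int) + 1))))
      = (pvSfx k (cs.take (i + 1))).map (fun v => String.ofList v) := by
  have hlen : (cs.take (i + 1)).length = i + 1 := by simp; omega
  have hMm : (min k ((i : Int) + 1) + 1 - 1).toNat = (min k ((cs.take (i + 1)).length : Int)).toNat := by
    rw [hlen]; push_cast; omega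
  rw [PySem.List.pyRange_one, hMm]
  unfold pvSfx
  rw [List.range_succ_eq_map]
  simp only [List.map_cons, List.map_map]
  refine List.cons_eq_cons.mpr ⟨?_, ?_⟩
  · rw [hlen]
    simp
  · apply List.map_congr_left
    intro j hj
    have hj' : j < (min k ((cs.take (i + 1)).length : Int)).toNat := List.mem_range.mp hj
    have hji : j ≤ i := by rw [hlen] at hj'; omega
    simp only [Function.comp]
    have hcast : (1 : Int) + (j : Int) = ((1 + j : Nat) : Int) := by push_cast; ring
    have hcast1 : (i : Int) + 1 - ((1 + j : Nat) : Int) = ((i - j : Nat) : Int) := by push_cast; omega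
    have hcast2 : (i : Int) + 1 = (((i + 1 : Nat)) : Int) := by push_cast; ring
    rw [hcast, hcast1, hcast2, PySem.List.slice_natCast]
    congr 1
    rw [hlen]
    have h1 : i + 1 - (j + 1) = i - j := by omega
    rw [h1, List.drop_take]

theorem pv_B_char (seq : String) (k : Int) :
    liste_pref_alt seq k
      = ((List.range seq.toList.length).flatMap (fun (i : Nat) => pvSfx k (seq.toList.take (i + 1)))).map
          (fun v => String.ofList v) := by
  unfold liste_pref_alt
  have hfold : ∀ (l : List Nat) (init : List String),
      l.foldl (fun (res : List String) (i : Nat) =>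
        res ++ [""] ++ (PySem.List.pyRange 1 (min k ((i : Int) + 1) + 1) 1).map
          (fun (len : Int) =>
            String.ofList (PySem.List.slice seq.toList (some ((i : Int) + 1 - len)) (some ((i : Int) + 1))))) init
      = init ++ l.flatMap (fun (i : Nat) =>
          [""] ++ (PySem.List.pyRange 1 (min k ((i : Int) + 1) + 1) 1).map
            (fun (len : Int) =>
              String.ofList (PySem.List.slice seq.toList (some ((i : Int) + 1 - len)) (some ((i : Int) + 1))))) := by
    intro l
    induction l with
    | nil => simp
    | cons x t ih => intro init; simp only [List.foldl_cons, List.flatMap_cons, ih]; simp [List.append_assoc]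
  rw [hfold, List.map_flatMap]
  simp only [List.nil_append]
  apply List.flatMap_congr
  intro i hi
  exact pv_block_B k seq.toList i (List.mem_range.mp hi)

-- ===== VERDICT (by name: the statement is the Claim_ definition above) =====
theorem liste_pref_spec : Claim_equal_liste_pref := by
  intro seq k _
  unfold Spec_liste_pref
  rw [pv_A_char, pv_B_char]
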